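-- pv_equiv track=rewrite | github.com/waifuai/ai-benchmarks | benchmarks/maze/evaluator.py | count_adjacent_traps
-- ===== SOURCE A (Python) =====
-- from typing import List, Tuple, Dict, Set, Optional
--
-- def count_adjacent_traps(grid: List[str], valid_path: Set[Tuple[int, int]]) -> int:
--     """Count traps adjacent to the valid path."""
--     adjacent_traps = 0
--
--     for i, j in valid_path:
--         # Check all four adjacent positions
--         for di, dj in [(-1, 0), (1, 0), (0, -1), (0, 1)]:
--             ni, nj = i + di, j + dj
--
--             # Check bounds and if it's a trap
--             if (0 <= ni < len(grid) and 0 <= nj < len(grid[ni]) and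
--                 grid[ni][nj] == 'T'):
--                 adjacent_traps += 1
--
--     return adjacent_traps
-- ===== SOURCE B (Python) =====
-- def count_adjacent_traps(grid, valid_path):
--     """Count traps adjacent to the valid path, scanning the grid for trap
--     cells instead of iterating the path (adjacency is symmetric)."""
--     return sum(
--         sum(1 for di, dj in ((-1, 0), (1, 0), (0, -1), (0, 1))
--             if (ni + di, nj + dj) in valid_path)
--         for ni, row in enumerate(grid)
--         for nj, ch in enumerate(row)
--         if ch == 'T'
--     )
-- ===== Notes on version B (the rewrite author's own statement) =====
-- stated objective: alternative
-- what changed: B inverts the traversal: instead of walking the path and probing the grid at the four neighbours of each path cell, it scans the grid once for trap cells and counts, for each trap, how many of its four neighbours lie in the path set, relying on the symmetry of adjacency; bounds checks disappear entirely.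
import Mathlib
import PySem

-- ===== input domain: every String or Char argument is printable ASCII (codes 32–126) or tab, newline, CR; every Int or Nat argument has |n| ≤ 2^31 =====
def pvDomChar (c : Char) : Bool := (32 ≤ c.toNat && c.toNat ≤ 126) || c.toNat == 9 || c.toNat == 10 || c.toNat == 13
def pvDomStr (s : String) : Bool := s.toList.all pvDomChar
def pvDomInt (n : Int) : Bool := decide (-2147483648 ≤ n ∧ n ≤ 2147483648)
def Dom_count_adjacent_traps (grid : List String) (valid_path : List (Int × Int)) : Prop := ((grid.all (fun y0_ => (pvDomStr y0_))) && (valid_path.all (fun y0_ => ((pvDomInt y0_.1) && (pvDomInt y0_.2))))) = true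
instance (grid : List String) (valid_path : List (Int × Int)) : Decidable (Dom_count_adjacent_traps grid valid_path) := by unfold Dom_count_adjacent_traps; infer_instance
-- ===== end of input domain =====

-- B inverts the traversal: it scans the grid for trap cells and counts, per trap, the
-- neighbours lying in the path set (adjacency is symmetric), instead of walking the path
-- and probing the grid; objective: alternative (same result, different algorithm).


-- the four neighbour offsets [(-1, 0), (1, 0), (0, -1), (0, 1)] (shared literal of both Pythons)
def pvDirs : List (Int × Int) := [(-1, 0), (1, 0), (0, -1), (0, 1)]

-- ===== PORT A =====
-- A's guard '0 <= ni < len(grid) and 0 <= nj < len(grid[ni]) and grid[ni][nj] == 'T''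
def pvTrapAt (grid : List String) (ni nj : Int) : Bool :=
  decide (0 ≤ ni) && decide (ni < (grid.length : Int)) &&
    (match PySem.List.pyGet? grid ni with
     | some row => decide (0 ≤ nj) && decide (nj < PySem.Str.len row) &&
         (PySem.Str.pyGet? row nj == some 'T')
     | none => false)

def count_adjacent_traps (grid : List String) (valid_path : List (Int × Int)) : Int :=
  valid_path.foldl (fun acc p =>
    pvDirs.foldl (fun acc2 d =>
      if pvTrapAt grid (p.1 + d.1) (p.2 + d.2) then acc2 + 1 else acc2) acc) 0

-- ===== PORT B =====
-- Source B's 'sum(1 for di, dj in dirs if (ni+di, nj+dj) in valid_path)'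
def pvDirCount (valid_path : List (Int × Int)) (ni nj : Int) : Int :=
  (pvDirs.countP (fun d => decide ((ni + d.1, nj + d.2) ∈ valid_path)) : Nat)

-- Source B's generator sum over 'for ni, row in enumerate(grid) for nj, ch in enumerate(row) if ch == 'T''
def count_adjacent_traps_alt (grid : List String) (valid_path : List (Int × Int)) : Int :=
  ((PySem.List.enumerate grid 0).flatMap (fun pr =>
    (PySem.List.enumerate pr.2.toList 0).filterMap (fun qc =>
      if qc.2 = 'T' then some (pvDirCount valid_path pr.1 qc.1) else none))).sum

-- ===== PRECONDITION & SPEC =====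
-- valid_path is a Python set: per the type convention its list holds DISTINCT elements;
-- Pre_ states exactly that invariant (no set produces a duplicated element).
def Pre_count_adjacent_traps (grid : List String) (valid_path : List (Int × Int)) : Prop :=
  valid_path.Nodup
instance (grid : List String) (valid_path : List (Int × Int)) : Decidable (Pre_count_adjacent_traps grid valid_path) := by unfold Pre_count_adjacent_traps; infer_instance

def pvWitness_count_adjacent_traps : List String × (List (Int × Int)) :=
  (["T.T", ".T."], [(0, 1), (1, 0), (1, 2)])

def Spec_count_adjacent_traps (grid : List String) (valid_path : List (Int × Int)) (out : Int) : Prop := out = count_adjacent_traps_alt grid valid_path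
instance (grid : List String) (valid_path : List (Int × Int)) (out : Int) : Decidable (Spec_count_adjacent_traps grid valid_path out) := by unfold Spec_count_adjacent_traps; infer_instance

-- ===== CLAIM (what is proved, stated in full; the proofs are below) =====
def Claim_equal_count_adjacent_traps : Prop := ∀ (grid : List String) (valid_path : List (Int × Int)), Dom_count_adjacent_traps grid valid_path → Pre_count_adjacent_traps grid valid_path → Spec_count_adjacent_traps grid valid_path (count_adjacent_traps grid valid_path)

-- ===== LEMMAS AND PROOFS =====

-- Integer sum of f over a list (proof-side shorthand)
def isum {α : Type} (l : List α) (f : α → Int) : Int := (l.map f).sum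

-- the trap cells of one row, as (rowIndex, colIndex) pairs, columns numbered from s
def rowCells (ni : Int) : List Char → Int → List (Int × Int)
  | [], _ => []
  | c :: cs, s => (if c = 'T' then [(ni, s)] else []) ++ rowCells ni cs (s + 1)

-- all trap cells of the grid, rows numbered from s
def gridCells : List String → Int → List (Int × Int)
  | [], _ => []
  | r :: rs, s => rowCells s r.toList 0 ++ gridCells rs (s + 1)

theorem isum_congr {α : Type} (l : List α) (f g : α → Int)
    (h : ∀ x ∈ l, f x = g x) : isum l f = isum l g := by
  unfold isum; rw [List.map_congr_left h]

theorem isum_swap {α β : Type} (l1 : List α) (l2 : List β) (f : α → β → Int) :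
    isum l1 (fun x => isum l2 (f x)) = isum l2 (fun y => isum l1 (fun x => f x y)) := by
  induction l1 with
  | nil => simp [isum]
  | cons a t ih =>
      simp only [isum, List.map_cons, List.sum_cons] at *
      rw [PySem.List.sum_map_add_int l2 (f a) (fun y => (List.map (fun x => f x y) t).sum)]
      simp [ih]

theorem isum_zero {α : Type} (l : List α) (f : α → Int)
    (h : ∀ x ∈ l, f x = 0) : isum l f = 0 := by
  unfold isum; rw [List.map_congr_left h]; simp

theorem isum_indicator {α : Type} [DecidableEq α] (l : List α) (hn : l.Nodup) (q : α)
    (hq : q ∈ l) : isum l (fun x => if x = q then (1 : Int) else 0) = 1 := by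
  induction l with
  | nil => cases hq
  | cons a t ih =>
      simp only [List.nodup_cons] at hn
      simp only [isum, List.map_cons, List.sum_cons]
      by_cases h : q = a
      · subst h
        have hz : isum t (fun x => if x = q then (1 : Int) else 0) = 0 :=
          isum_zero t _ (fun x hx => if_neg (by rintro rfl; exact hn.1 hx))
        simp only [isum] at hz
        rw [if_pos rfl, hz]
        ring
      · have hqt : q ∈ t := by
          rcases List.mem_cons.1 hq with h' | h'
          · exact absurd h' h
          · exact h'
        rw [if_neg (fun he => h he.symm)]
        have := ih hn.2 hqt
        simp only [isum] at this
        simp [this]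

theorem isum_mem {α : Type} [DecidableEq α] (l : List α) (hn : l.Nodup) (q : α)
    [inst : Decidable (q ∈ l)] :
    (if q ∈ l then (1 : Int) else 0) = isum l (fun x => if x = q then 1 else 0) := by
  by_cases h : q ∈ l
  · rw [if_pos h, isum_indicator l hn q h]
  · rw [if_neg h, isum_zero l _ (fun x hx => if_neg (by rintro rfl; exact h hx))]

theorem mem_rowCells (ni : Int) (cs : List Char) (s : Int) (x y : Int) :
    (x, y) ∈ rowCells ni cs s ↔
      x = ni ∧ ∃ (k : Nat) (h : k < cs.length), y = s + k ∧ cs[k] = 'T' := by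
  induction cs generalizing s with
  | nil => simp [rowCells]
  | cons c t ih =>
      simp only [rowCells, List.mem_append, ih]
      constructor
      · rintro (h | ⟨rfl, k, hk, rfl, hT⟩)
        · by_cases hc : c = 'T'
          · simp [hc] at h
            exact ⟨h.1, 0, by simp, by omega, by simpa using hc⟩
          · simp [hc] at h
        · exact ⟨rfl, k + 1, by simpa using hk, by push_cast; omega, by simpa using hT⟩
      · rintro ⟨rfl, k, hk, rfl, hT⟩
        cases k with
        | zero => left; simp at hT; simp [hT]
        | succ m =>
            right
            exact ⟨rfl, m, by simpa using hk, by push_cast; omega, by simpa using hT⟩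

theorem mem_gridCells (rs : List String) (s : Int) (x y : Int) :
    (x, y) ∈ gridCells rs s ↔
      ∃ (k : Nat) (h : k < rs.length), x = s + k ∧ (x, y) ∈ rowCells x (rs[k].toList) 0 := by
  induction rs generalizing s with
  | nil => simp [gridCells]
  | cons r t ih =>
      simp only [gridCells, List.mem_append, ih]
      constructor
      · rintro (h | ⟨k, hk, rfl, hm⟩)
        · have hx : x = s := ((mem_rowCells s r.toList 0 x y).1 h).1
          subst hx
          exact ⟨0, by simp, by omega, by simpa using h⟩
        · exact ⟨k + 1, by simpa using hk, by push_cast; omega, by simpa using hm⟩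
      · rintro ⟨k, hk, rfl, hm⟩
        cases k with
        | zero => left; simpa using hm
        | succ m =>
            right
            exact ⟨m, by simpa using hk, by push_cast; omega, by simpa using hm⟩

theorem nodup_rowCells (ni : Int) (cs : List Char) (s : Int) : (rowCells ni cs s).Nodup := by
  induction cs generalizing s with
  | nil => simp [rowCells]
  | cons c t ih =>
      by_cases hc : c = 'T'
      · subst hc
        simp only [rowCells, if_pos, List.singleton_append, List.nodup_cons]
        refine ⟨fun h => ?_, ih (s + 1)⟩
        obtain ⟨-, k, hk, hy, -⟩ := (mem_rowCells ni t (s + 1) ni s).1 h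
        omega
      · simpa [rowCells, hc] using ih (s + 1)

theorem nodup_gridCells (rs : List String) (s : Int) : (gridCells rs s).Nodup := by
  induction rs generalizing s with
  | nil => simp [gridCells]
  | cons r t ih =>
      simp only [gridCells]
      refine List.Nodup.append (nodup_rowCells s r.toList 0) (ih (s + 1)) ?_
      intro p hp hq
      obtain ⟨x, y⟩ := p
      have hx : x = s := ((mem_rowCells s r.toList 0 x y).1 hp).1
      obtain ⟨k, hk, hx2, -⟩ := (mem_gridCells t (s + 1) x y).1 hq
      omega

theorem trapAt_iff (grid : List String) (x y : Int) :
    pvTrapAt grid x y = true ↔ (x, y) ∈ gridCells grid 0 := by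
  rw [mem_gridCells]
  unfold pvTrapAt
  constructor
  · intro h
    simp only [Bool.and_eq_true, decide_eq_true_eq] at h
    obtain ⟨⟨hx0, hxlt⟩, hm⟩ := h
    have hxe : x = (x.toNat : Int) := by omega
    have hlt : x.toNat < grid.length := by omega
    rw [hxe, PySem.List.pyGet?_natCast, List.getElem?_eq_getElem hlt] at hm
    simp only [Bool.and_eq_true, decide_eq_true_eq, beq_iff_eq] at hm
    obtain ⟨⟨hy0, hylt⟩, hT⟩ := hm
    rw [PySem.Str.len_eq] at hylt
    have hye : y = (y.toNat : Int) := by omega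
    have hylt' : y.toNat < (grid[x.toNat]).toList.length := by omega
    rw [hye, PySem.Str.pyGet?_natCast, List.getElem?_eq_getElem hylt'] at hT
    refine ⟨x.toNat, hlt, by omega, ?_⟩
    rw [mem_rowCells]
    exact ⟨rfl, y.toNat, hylt', by omega, by simpa using hT⟩
  · rintro ⟨k, hk, rfl, hm⟩
    rw [mem_rowCells] at hm
    obtain ⟨-, m, hm', rfl, hT⟩ := hm
    simp only [Bool.and_eq_true, decide_eq_true_eq]
    have h1 : ((0:Int) + k) = (k : Int) := by omega
    rw [h1, PySem.List.pyGet?_natCast, List.getElem?_eq_getElem hk]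
    simp only [Bool.and_eq_true, decide_eq_true_eq, beq_iff_eq]
    have h2 : ((0:Int) + m) = (m : Int) := by omega
    rw [h2, PySem.Str.pyGet?_natCast, List.getElem?_eq_getElem hm']
    refine ⟨⟨by omega, by omega⟩, ⟨by omega, ?_⟩, by simp [hT]⟩
    rw [PySem.Str.len_eq]; omega

theorem A_eq (grid : List String) (path : List (Int × Int)) :
    count_adjacent_traps grid path =
      isum path (fun p => isum pvDirs (fun d =>
        if pvTrapAt grid (p.1 + d.1) (p.2 + d.2) then 1 else 0)) := by
  have inner : ∀ (acc : Int) (p : Int × Int),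
      pvDirs.foldl (fun acc2 d =>
        if pvTrapAt grid (p.1 + d.1) (p.2 + d.2) then acc2 + 1 else acc2) acc
      = acc + isum pvDirs (fun d =>
          if pvTrapAt grid (p.1 + d.1) (p.2 + d.2) then 1 else 0) := by
    intro acc p
    simp only [pvDirs, isum, List.foldl, List.map, List.sum_cons, List.sum_nil]
    split_ifs <;> ring
  unfold count_adjacent_traps
  rw [show (fun (acc : Int) (p : Int × Int) =>
      pvDirs.foldl (fun acc2 d =>
        if pvTrapAt grid (p.1 + d.1) (p.2 + d.2) then acc2 + 1 else acc2) acc)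
    = (fun acc p => acc + isum pvDirs (fun d =>
        if pvTrapAt grid (p.1 + d.1) (p.2 + d.2) then 1 else 0))
    from funext fun acc => funext fun p => inner acc p]
  rw [PySem.List.foldl_add path _ 0, zero_add]
  rfl

theorem B_eq (grid : List String) (path : List (Int × Int)) :
    count_adjacent_traps_alt grid path =
      isum (gridCells grid 0) (fun c => isum pvDirs (fun d =>
        if (c.1 + d.1, c.2 + d.2) ∈ path then 1 else 0)) := by
  have hdc : ∀ ni nj : Int, pvDirCount path ni nj =
      isum pvDirs (fun d => if (ni + d.1, nj + d.2) ∈ path then (1:Int) else 0) := by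
    intro ni nj
    unfold pvDirCount isum
    rw [← PySem.List.sum_map_ite_one_zero (fun d => decide ((ni + d.1, nj + d.2) ∈ path)) pvDirs]
    simp
  have hrow : ∀ (cs : List Char) (s ni : Int),
      ((PySem.List.enumerate cs s).filterMap (fun qc =>
        if qc.2 = 'T' then some (pvDirCount path ni qc.1) else none))
      = (rowCells ni cs s).map (fun c => pvDirCount path c.1 c.2) := by
    intro cs
    induction cs with
    | nil => intro s ni; simp [PySem.List.enumerate, rowCells]
    | cons c t ih =>
        intro s ni
        rw [PySem.List.enumerate_cons]
        by_cases hc : c = 'T' <;>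
          simp [rowCells, hc, ih]
  have hgrid : ∀ (rs : List String) (s : Int),
      ((PySem.List.enumerate rs s).flatMap (fun pr =>
        (PySem.List.enumerate pr.2.toList 0).filterMap (fun qc =>
          if qc.2 = 'T' then some (pvDirCount path pr.1 qc.1) else none)))
      = (gridCells rs s).map (fun c => pvDirCount path c.1 c.2) := by
    intro rs
    induction rs with
    | nil => intro s; simp [PySem.List.enumerate, gridCells]
    | cons r t ih =>
        intro s
        rw [PySem.List.enumerate_cons]
        simp only [List.flatMap_cons, gridCells, List.map_append, ih]
        rw [hrow]
  unfold count_adjacent_traps_alt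
  rw [hgrid grid 0]
  unfold isum
  congr 1
  apply List.map_congr_left
  intro c _
  exact hdc c.1 c.2

theorem dirs_flip (p c : Int × Int) :
    isum pvDirs (fun d => if c = (p.1 + d.1, p.2 + d.2) then (1 : Int) else 0) =
    isum pvDirs (fun d => if p = (c.1 + d.1, c.2 + d.2) then (1 : Int) else 0) := by
  obtain ⟨p1, p2⟩ := p
  obtain ⟨c1, c2⟩ := c
  simp only [isum, pvDirs, List.map, List.sum_cons, List.sum_nil, Prod.mk.injEq]
  split_ifs <;> omega

-- ===== VERDICT (by name: the statement is the Claim_ definition above) =====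
theorem count_adjacent_traps_spec : Claim_equal_count_adjacent_traps := by
  intro grid path _hdom hpre
  unfold Spec_count_adjacent_traps
  rw [A_eq, B_eq]
  have hT := nodup_gridCells grid 0
  calc
    isum path (fun p => isum pvDirs (fun d =>
        if pvTrapAt grid (p.1 + d.1) (p.2 + d.2) then 1 else 0))
      = isum path (fun p => isum pvDirs (fun d => isum (gridCells grid 0)
          (fun c => if c = (p.1 + d.1, p.2 + d.2) then 1 else 0))) := by
        refine isum_congr _ _ _ (fun p _ => isum_congr _ _ _ (fun d _ => ?_))
        rw [if_congr (trapAt_iff grid (p.1 + d.1) (p.2 + d.2)) rfl rfl]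
        exact isum_mem (gridCells grid 0) hT (p.1 + d.1, p.2 + d.2)
    _ = isum path (fun p => isum (gridCells grid 0)
          (fun c => isum pvDirs (fun d => if c = (p.1 + d.1, p.2 + d.2) then 1 else 0))) := by
        exact isum_congr _ _ _ (fun p _ => isum_swap pvDirs (gridCells grid 0) _)
    _ = isum path (fun p => isum (gridCells grid 0)
          (fun c => isum pvDirs (fun d => if p = (c.1 + d.1, c.2 + d.2) then 1 else 0))) := by
        exact isum_congr _ _ _ (fun p _ => isum_congr _ _ _ (fun c _ => dirs_flip p c))
    _ = isum (gridCells grid 0) (fun c => isum path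
          (fun p => isum pvDirs (fun d => if p = (c.1 + d.1, c.2 + d.2) then 1 else 0))) := by
        exact isum_swap path (gridCells grid 0) _
    _ = isum (gridCells grid 0) (fun c => isum pvDirs
          (fun d => isum path (fun p => if p = (c.1 + d.1, c.2 + d.2) then 1 else 0))) := by
        exact isum_congr _ _ _ (fun c _ => isum_swap path pvDirs _)
    _ = isum (gridCells grid 0) (fun c => isum pvDirs
          (fun d => if (c.1 + d.1, c.2 + d.2) ∈ path then 1 else 0)) := by
        refine isum_congr _ _ _ (fun c _ => isum_congr _ _ _ (fun d _ => ?_))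
        exact (isum_mem path hpre (c.1 + d.1, c.2 + d.2)).symm
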